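-- pv_equiv track=rewrite | github.com/Vasilesk/ts-idx-2018 | docindex.py | nums_from_varbyte
-- ===== SOURCE A (Python) =====
-- def nums_from_varbyte(varbyte):
--     last_num = 0
--     res = []
--     mask = 127
--     mask_end = 128
--
--     elem = 0
--     elem_size = 0
--     for x in varbyte:
--         elem = elem << 7
--         elem += x & mask
--         elem_size += 1
--         if x & mask_end:
--             new_elem = 0
--             while elem_size != 0:
--                 new_elem = new_elem << 7
--                 new_elem += elem & mask
--                 elem = elem >> 7
--                 elem_size -= 1
--
--             last_num = new_elem + last_num
--             res.append(last_num)
--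
--             elem_size = 0
--             elem = 0
--
--     return res
-- ===== SOURCE B (Python) =====
-- def nums_from_varbyte(varbyte):
--     last_num = 0
--     res = []
--     value = 0
--     shift = 0
--     for x in varbyte:
--         value += (x & 127) << shift
--         shift += 7
--         if x & 128:
--             last_num += value
--             res.append(last_num)
--             value = 0
--             shift = 0
--     return res
-- ===== Notes on version B (the rewrite author's own statement) =====
-- stated objective: simpler
-- what changed: B decodes each varbyte group in one forward pass by adding (x & 127) << shift with a growing shift, replacing A's big-endian accumulator plus the inner while loop that re-reverses the 7-bit digits at every group end.
import Mathlib
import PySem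

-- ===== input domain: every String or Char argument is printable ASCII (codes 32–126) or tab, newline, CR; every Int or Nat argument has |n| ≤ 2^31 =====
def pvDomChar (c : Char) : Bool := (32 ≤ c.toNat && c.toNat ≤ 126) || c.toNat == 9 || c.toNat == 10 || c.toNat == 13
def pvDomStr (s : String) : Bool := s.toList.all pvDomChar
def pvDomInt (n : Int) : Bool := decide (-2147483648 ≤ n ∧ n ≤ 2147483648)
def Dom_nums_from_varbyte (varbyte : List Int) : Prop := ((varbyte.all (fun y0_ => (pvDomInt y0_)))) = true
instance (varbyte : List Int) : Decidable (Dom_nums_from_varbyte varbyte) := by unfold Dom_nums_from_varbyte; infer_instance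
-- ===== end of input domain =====

-- B replaces A's big-endian accumulate-then-reverse inner while loop by a single forward pass with a
-- positional shift; same return value, no side effects involved.

-- ===== PORT A =====
-- A's inner `while elem_size != 0` loop: elem_size starts at 0, is only incremented and reset to 0,
-- so it is always ≥ 0 and the while runs exactly elem_size times; we track it as a Nat and recurse on it.
def pvRevLoop : Nat → Int → Int → Int
  | 0, new_elem, _ => new_elem
  | n + 1, new_elem, elem =>
      pvRevLoop n ((new_elem <<< (7 : Nat)) + PySem.Int.band elem 127) (elem >>> (7 : Nat))

def pvStepA : (Int × List Int × Int × Nat) → Int → (Int × List Int × Int × Nat)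
  | (last_num, res, elem, elem_size), x =>
    let elem := (elem <<< (7 : Nat)) + PySem.Int.band x 127
    let elem_size := elem_size + 1
    if PySem.Int.band x 128 ≠ 0 then
      let new_elem := pvRevLoop elem_size 0 elem
      let last_num := new_elem + last_num
      (last_num, res ++ [last_num], 0, 0)
    else
      (last_num, res, elem, elem_size)

def nums_from_varbyte (varbyte : List Int) : List Int :=
  (varbyte.foldl pvStepA (0, [], 0, 0)).2.1

-- ===== PORT B =====
def pvStepB : (Int × List Int × Int × Nat) → Int → (Int × List Int × Int × Nat)
  | (last_num, res, value, shift), x =>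
    let value := value + (PySem.Int.band x 127 <<< shift)
    let shift := shift + 7
    if PySem.Int.band x 128 ≠ 0 then
      let last_num := last_num + value
      (last_num, res ++ [last_num], 0, 0)
    else
      (last_num, res, value, shift)

def nums_from_varbyte_alt (varbyte : List Int) : List Int :=
  (varbyte.foldl pvStepB (0, [], 0, 0)).2.1

-- ===== PRECONDITION & SPEC =====
def Spec_nums_from_varbyte (varbyte : List Int) (out : List Int) : Prop := out = nums_from_varbyte_alt varbyte
instance (varbyte : List Int) (out : List Int) : Decidable (Spec_nums_from_varbyte varbyte out) := by unfold Spec_nums_from_varbyte; infer_instance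

-- ===== CLAIM (what is proved, stated in full; the proofs are below) =====
def Claim_equal_nums_from_varbyte : Prop := ∀ (varbyte : List Int), Dom_nums_from_varbyte varbyte → Spec_nums_from_varbyte varbyte (nums_from_varbyte varbyte)

-- ===== LEMMAS AND PROOFS =====

-- big-endian value of a digit list on top of an accumulator
def pvBE (acc : Int) (ds : List Int) : Int := ds.foldl (fun a d => a * 128 + d) acc

theorem pvBE_append (acc : Int) (ds : List Int) (d : Int) :
    pvBE acc (ds ++ [d]) = pvBE acc ds * 128 + d := by
  simp [pvBE]

theorem pvBE_nonneg (acc : Int) (ds : List Int) (hacc : 0 ≤ acc)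
    (h : ∀ d ∈ ds, 0 ≤ d) : 0 ≤ pvBE acc ds := by
  induction ds generalizing acc with
  | nil => exact hacc
  | cons d ds ih =>
      have hd : 0 ≤ d := h d (by simp)
      exact ih _ (by nlinarith) (fun e he => h e (by simp [he]))

theorem pvBE_split (a : Int) (ds : List Int) :
    pvBE a ds = a * 128 ^ ds.length + pvBE 0 ds := by
  induction ds generalizing a with
  | nil => simp [pvBE]
  | cons d ds ih =>
      have h1 : pvBE a (d :: ds) = pvBE (a * 128 + d) ds := by simp [pvBE]
      have h2 : pvBE 0 (d :: ds) = pvBE (0 * 128 + d) ds := by simp [pvBE]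
      rw [h1, h2, ih (a * 128 + d), ih (0 * 128 + d)]
      simp [List.length_cons, pow_succ]
      ring

theorem pv_band127_bounds (x : Int) :
    0 ≤ PySem.Int.band x 127 ∧ PySem.Int.band x 127 < 128 := by
  unfold PySem.Int.band
  split_ifs with h1 h2 h2
  · have := @Nat.and_le_right x.toNat (127 : Int).toNat
    constructor
    · positivity
    · omega
  · omega
  · constructor <;> omega
  · omega

theorem pv_extract (a d : Int) (ha : 0 ≤ a) (hd0 : 0 ≤ d) (hd1 : d < 128) :
    PySem.Int.band (a * 128 + d) 127 = d ∧ (a * 128 + d) >>> (7 : Nat) = a := by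
  have he : 0 ≤ a * 128 + d := by nlinarith
  constructor
  · rw [PySem.Int.band_of_nonneg he (by norm_num)]
    have ht : (a * 128 + d).toNat = a.toNat * 128 + d.toNat := by omega
    have h127 : (127 : Int).toNat = 2 ^ 7 - 1 := rfl
    rw [ht, h127, Nat.and_two_pow_sub_one_eq_mod]
    have h2 : (2 : Nat) ^ 7 = 128 := rfl
    rw [h2]
    omega
  · rw [Int.shiftRight_eq_div_pow]
    have h2 : ((2 ^ 7 : Nat) : Int) = 128 := by norm_num
    rw [h2]
    omega

theorem pvRevLoop_spec (ds : List Int) (h : ∀ d ∈ ds, 0 ≤ d ∧ d < 128) (acc : Int) :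
    pvRevLoop ds.length acc (pvBE 0 ds) = pvBE acc ds.reverse := by
  induction ds using List.reverseRecOn generalizing acc with
  | nil => simp [pvRevLoop, pvBE]
  | append_singleton ds d ih =>
      have hd := h d (by simp)
      have hds : ∀ e ∈ ds, 0 ≤ e ∧ e < 128 := fun e he => h e (by simp [he])
      have hnn : 0 ≤ pvBE 0 ds := pvBE_nonneg 0 ds le_rfl (fun e he => (hds e he).1)
      obtain ⟨hband, hshift⟩ := pv_extract (pvBE 0 ds) d hnn hd.1 hd.2
      have hlen : (ds ++ [d]).length = ds.length + 1 := by simp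
      rw [hlen, pvBE_append]
      show pvRevLoop ds.length ((acc <<< (7 : Nat)) + PySem.Int.band (pvBE 0 ds * 128 + d) 127)
        ((pvBE 0 ds * 128 + d) >>> (7 : Nat)) = pvBE acc (ds ++ [d]).reverse
      rw [hband, hshift, Int.shiftLeft_eq]
      have h128 : acc * 2 ^ 7 + d = acc * 128 + d := by norm_num
      rw [h128, ih hds (acc * 128 + d)]
      simp [pvBE]

theorem pv_main (l : List Int) : ∀ (last : Int) (res : List Int) (ds : List Int),
    (∀ d ∈ ds, 0 ≤ d ∧ d < 128) →
    (l.foldl pvStepA (last, res, pvBE 0 ds, ds.length)).2.1 =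
    (l.foldl pvStepB (last, res, pvBE 0 ds.reverse, 7 * ds.length)).2.1 := by
  induction l with
  | nil => intro last res ds _; rfl
  | cons x l ih =>
      intro last res ds hds
      have hx := pv_band127_bounds x
      have hA : pvStepA (last, res, pvBE 0 ds, ds.length) x =
          if PySem.Int.band x 128 ≠ 0 then
            (pvRevLoop (ds.length + 1) 0 (pvBE 0 ds <<< (7 : Nat) + PySem.Int.band x 127) + last,
             res ++ [pvRevLoop (ds.length + 1) 0 (pvBE 0 ds <<< (7 : Nat) + PySem.Int.band x 127) + last], 0, 0)
          else
            (last, res, pvBE 0 ds <<< (7 : Nat) + PySem.Int.band x 127, ds.length + 1) := by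
        simp [pvStepA]
      have hB : pvStepB (last, res, pvBE 0 ds.reverse, 7 * ds.length) x =
          if PySem.Int.band x 128 ≠ 0 then
            (last + (pvBE 0 ds.reverse + (PySem.Int.band x 127 <<< (7 * ds.length))),
             res ++ [last + (pvBE 0 ds.reverse + (PySem.Int.band x 127 <<< (7 * ds.length)))], 0, 0)
          else
            (last, res, pvBE 0 ds.reverse + (PySem.Int.band x 127 <<< (7 * ds.length)), 7 * ds.length + 7) := by
        simp [pvStepB]
      set d := PySem.Int.band x 127 with hdd
      have helem : pvBE 0 ds <<< (7 : Nat) + d = pvBE 0 (ds ++ [d]) := by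
        rw [Int.shiftLeft_eq, pvBE_append]; norm_num
      have hvalue : pvBE 0 ds.reverse + (d <<< (7 * ds.length)) = pvBE 0 (ds ++ [d]).reverse := by
        rw [Int.shiftLeft_eq]
        have : pvBE 0 (ds ++ [d]).reverse = pvBE 0 (d :: ds.reverse) := by simp
        rw [this]
        have hc : pvBE 0 (d :: ds.reverse) = pvBE (0 * 128 + d) ds.reverse := by simp [pvBE]
        rw [hc, pvBE_split]
        have hl : ds.reverse.length = ds.length := by simp
        rw [hl]
        have hp : ((2 : Int)) ^ (7 * ds.length) = 128 ^ ds.length := by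
          rw [pow_mul]; norm_num
        rw [hp, pvBE_split (0 * 128 + d) ds.reverse, hl]
        ring
      have hds' : ∀ e ∈ ds ++ [d], 0 ≤ e ∧ e < 128 := by
        intro e he
        rcases List.mem_append.mp he with h | h
        · exact hds e h
        · simp at h; subst h; exact hx
      simp only [List.foldl_cons, hA, hB]
      by_cases hc : PySem.Int.band x 128 ≠ 0
      · simp only [if_pos hc]
        have hrev : pvRevLoop (ds.length + 1) 0 (pvBE 0 ds <<< (7 : Nat) + d) =
            pvBE 0 (ds ++ [d]).reverse := by
          rw [helem]
          have hl : (ds ++ [d]).length = ds.length + 1 := by simp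
          rw [← hl]
          exact pvRevLoop_spec (ds ++ [d]) hds' 0
        have hval : last + (pvBE 0 ds.reverse + (d <<< (7 * ds.length))) =
            pvRevLoop (ds.length + 1) 0 (pvBE 0 ds <<< (7 : Nat) + d) + last := by
          rw [hrev, hvalue]; ring
        rw [← hval]
        have := ih (last + (pvBE 0 ds.reverse + (d <<< (7 * ds.length))))
          (res ++ [last + (pvBE 0 ds.reverse + (d <<< (7 * ds.length)))]) []
          (by intro e he; simp at he)
        simpa [pvBE] using this
      · simp only [if_neg hc]
        rw [helem, hvalue]
        have hl1 : ds.length + 1 = (ds ++ [d]).length := by simp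
        have hl2 : 7 * ds.length + 7 = 7 * (ds ++ [d]).length := by simp; ring
        rw [hl1, hl2]
        exact ih last res (ds ++ [d]) hds'

-- ===== VERDICT (by name: the statement is the Claim_ definition above) =====
theorem nums_from_varbyte_spec : Claim_equal_nums_from_varbyte := by
  intro varbyte _
  unfold Spec_nums_from_varbyte nums_from_varbyte nums_from_varbyte_alt
  have := pv_main varbyte 0 [] [] (by intro e he; simp at he)
  simpa [pvBE] using this
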